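-- pv_equiv track=rewrite | github.com/max-models/tikzfigure | astro_docs/scripts/build_tutorials.py | fence_indented_output_blocks
-- ===== SOURCE A (Python) =====
-- TAB = "    "
--
-- def fence_indented_output_blocks(content: str) -> str:
--     """Convert top-level 4-space-indented blocks into fenced text code blocks."""
--     lines = content.splitlines()
--     out: list[str] = []
--     i = 0
--     in_fence = False
--
--     while i < len(lines):
--         line = lines[i]
--
--         # Track whether we're inside a fenced code block
--         if line.startswith("```"):
--             in_fence = not in_fence
--             out.append(line)
--             i += 1
--             continue
--
--         prev_blank = i == 0 or lines[i - 1].strip() == ""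
--
--         # Only process indented blocks if we're NOT in a fence
--         if line.startswith(TAB) and prev_blank and not in_fence:
--             block: list[str] = []
--             j = i
--             while j < len(lines):
--                 current = lines[j]
--                 if current.startswith(TAB):
--                     block.append(current[len(TAB) :])
--                     j += 1
--                     continue
--                 # Keep blank lines inside the block if followed by another
--                 # indented line, so one output becomes one fenced block.
--                 if (
--                     current.strip() == ""
--                     and j + 1 < len(lines)
--                     and lines[j + 1].startswith(TAB)
--                 ):
--                     block.append("")
--                     j += 1
--                     continue
--                 break
--
--             out.append("```tex")
--             out.extend(block)
--             out.append("```")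
--             i = j
--             continue
--
--         out.append(line)
--         i += 1
--
--     rewritten = "\n".join(out)
--     if content.endswith("\n"):
--         rewritten += "\n"
--     return rewritten
-- ===== SOURCE B (Python) =====
-- TAB = "    "
--
-- def fence_indented_output_blocks(content: str) -> str:
--     """Convert top-level 4-space-indented blocks into fenced text code blocks."""
--     lines = content.splitlines()
--     out: list[str] = []
--     in_fence = False
--     in_block = False
--     block: list[str] = []
--     prev_blank = True  # index 0 counts as preceded by a blank line
--
--     for idx, line in enumerate(lines):
--         if in_block:
--             if line.startswith(TAB):
--                 block.append(line[len(TAB):])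
--                 prev_blank = line.strip() == ""
--                 continue
--             if line.strip() == "" and idx + 1 < len(lines) and lines[idx + 1].startswith(TAB):
--                 block.append("")
--                 prev_blank = True
--                 continue
--             # flush the finished block, then reprocess this line normally
--             out.append("```tex")
--             out.extend(block)
--             out.append("```")
--             in_block = False
--             block = []
--         if line.startswith("```"):
--             in_fence = not in_fence
--             out.append(line)
--         elif line.startswith(TAB) and prev_blank and not in_fence:
--             in_block = True
--             block = [line[len(TAB):]]
--         else:
--             out.append(line)
--         prev_blank = line.strip() == ""
--
--     if in_block:
--         out.append("```tex")
--         out.extend(block)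
--         out.append("```")
--
--     rewritten = "\n".join(out)
--     if content.endswith("\n"):
--         rewritten += "\n"
--     return rewritten
-- ===== Notes on version B (the rewrite author's own statement) =====
-- stated objective: alternative
-- what changed: A's nested inner loop that consumes a whole indented block and rewinds the outer index is replaced by a single flat pass over the lines driven by explicit state (in_block flag, block accumulator, carried prev_blank) that flushes the fenced block when the state machine leaves block mode.
import Mathlib
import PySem

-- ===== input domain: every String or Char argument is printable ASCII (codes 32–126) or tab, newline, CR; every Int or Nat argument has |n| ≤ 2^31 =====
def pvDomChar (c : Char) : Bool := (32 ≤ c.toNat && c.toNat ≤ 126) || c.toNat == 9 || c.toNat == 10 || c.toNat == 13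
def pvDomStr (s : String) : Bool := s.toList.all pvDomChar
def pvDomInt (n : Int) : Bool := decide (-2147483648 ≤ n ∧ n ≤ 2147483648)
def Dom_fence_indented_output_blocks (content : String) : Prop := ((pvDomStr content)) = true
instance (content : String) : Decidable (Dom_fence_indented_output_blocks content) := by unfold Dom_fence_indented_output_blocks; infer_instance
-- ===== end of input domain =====

-- B replaces A's nested consuming inner loop (with outer-index rewinding) by one flat
-- pass with explicit state (in_block flag + block accumulator); same return value.

def pvTAB : String := "    "

-- ===== PORT A =====
-- inner 'while j < len(lines)' loop of A: collects the block, returns (block, j).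
-- fuel (≥ lines.length - j at every call) is a totality device only.
def pvAInner (lines : List String) (fuel : Nat) (j : Nat) (block : List String) :
    List String × Nat :=
  match fuel with
  | 0 => (block, j)
  | fuel+1 =>
    if j < lines.length then
      let current := lines.getD j ""
      if PySem.Str.startswith current pvTAB then
        pvAInner lines fuel (j+1) (block ++ [PySem.Str.slice current (some 4) none])
      else if PySem.Str.strip current == "" && decide (j+1 < lines.length)
              && PySem.Str.startswith (lines.getD (j+1) "") pvTAB then
        pvAInner lines fuel (j+1) (block ++ [""])
      else (block, j)
    else (block, j)

-- outer 'while i < len(lines)' loop of A (fuel is a totality device: i strictly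
-- increases each iteration, so lines.length fuel is always enough)
def pvALoop (lines : List String) (fuel : Nat) (i : Nat) (in_fence : Bool) : List String :=
  match fuel with
  | 0 => []
  | fuel+1 =>
    if i < lines.length then
      let line := lines.getD i ""
      if PySem.Str.startswith line "```" then
        line :: pvALoop lines fuel (i+1) (!in_fence)
      else
        let prev_blank := decide (i = 0) || (PySem.Str.strip (lines.getD (i-1) "") == "")
        if PySem.Str.startswith line pvTAB && prev_blank && !in_fence then
          let r := pvAInner lines lines.length i []
          "```tex" :: (r.1 ++ ("```" :: pvALoop lines fuel r.2 in_fence))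
        else
          line :: pvALoop lines fuel (i+1) in_fence
    else []

def fence_indented_output_blocks (content : String) : String :=
  let lines := PySem.Str.splitlines content
  let rewritten := PySem.Str.join "\n" (pvALoop lines lines.length 0 false)
  if PySem.Str.endswith content "\n" then rewritten ++ "\n" else rewritten

-- ===== PORT B =====
-- B's single flat pass: state = (in_fence, in_block, block accumulator, prev_blank);
-- the lines[idx+1] lookahead of Source B is the head of the remaining list.
def pvBLoop (ls : List String) (in_fence in_block : Bool) (block : List String)
    (prev_blank : Bool) : List String :=
  match ls with
  | [] => if in_block then "```tex" :: block ++ ["```"] else []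
  | line :: rest =>
    if in_block && PySem.Str.startswith line pvTAB then
      pvBLoop rest in_fence true (block ++ [PySem.Str.slice line (some 4) none])
        (PySem.Str.strip line == "")
    else if in_block && (PySem.Str.strip line == ""
            && (match rest with | nxt :: _ => PySem.Str.startswith nxt pvTAB | [] => false)) then
      pvBLoop rest in_fence true (block ++ [""]) true
    else
      (if in_block then "```tex" :: block ++ ["```"] else []) ++
      (if PySem.Str.startswith line "```" then
         line :: pvBLoop rest (!in_fence) false [] (PySem.Str.strip line == "")
       else if PySem.Str.startswith line pvTAB && prev_blank && !in_fence then
         pvBLoop rest in_fence true [PySem.Str.slice line (some 4) none]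
           (PySem.Str.strip line == "")
       else
         line :: pvBLoop rest in_fence false [] (PySem.Str.strip line == ""))

def fence_indented_output_blocks_alt (content : String) : String :=
  let lines := PySem.Str.splitlines content
  let rewritten := PySem.Str.join "\n" (pvBLoop lines false false [] true)
  if PySem.Str.endswith content "\n" then rewritten ++ "\n" else rewritten

-- ===== PRECONDITION & SPEC =====
def Spec_fence_indented_output_blocks (content : String) (out : String) : Prop := out = fence_indented_output_blocks_alt content
instance (content : String) (out : String) : Decidable (Spec_fence_indented_output_blocks content out) := by unfold Spec_fence_indented_output_blocks; infer_instance

-- ===== CLAIM (what is proved, stated in full; the proofs are below) =====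
def Claim_equal_fence_indented_output_blocks : Prop := ∀ (content : String), Dom_fence_indented_output_blocks content → Spec_fence_indented_output_blocks content (fence_indented_output_blocks content)

-- ===== LEMMAS AND PROOFS =====

theorem pvAInner_stop_ge (lines : List String) (f j : Nat) (block : List String)
    (h : lines.length ≤ j) : pvAInner lines f j block = (block, j) := by
  cases f with
  | zero => rfl
  | succ f => simp only [pvAInner]; rw [if_neg (by omega)]

theorem pvALoop_nil (lines : List String) (fuel i : Nat) (fence : Bool)
    (h : lines.length ≤ i) : pvALoop lines fuel i fence = [] := by
  cases fuel with
  | zero => rfl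
  | succ f => simp only [pvALoop]; rw [if_neg (by omega)]

-- the inner loop's result does not depend on the fuel, once the fuel is sufficient
theorem pvAInner_fuel (lines : List String) :
    ∀ f g j block, lines.length - j ≤ f → lines.length - j ≤ g →
      pvAInner lines f j block = pvAInner lines g j block := by
  intro f
  induction f with
  | zero =>
    intro g j block hf hg
    rw [pvAInner_stop_ge lines 0 j block (by omega),
      pvAInner_stop_ge lines g j block (by omega)]
  | succ f ih =>
    intro g j block hf hg
    by_cases hj : j < lines.length
    · obtain ⟨g', rfl⟩ : ∃ g', g = g' + 1 := ⟨g - 1, by omega⟩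
      simp only [pvAInner]
      rw [if_pos hj, if_pos hj]
      try dsimp only
      by_cases ht : PySem.Str.startswith (lines.getD j "") pvTAB = true
      · rw [if_pos ht, if_pos ht]
        exact ih g' (j+1) _ (by omega) (by omega)
      · rw [if_neg ht, if_neg ht]
        by_cases hbl : (PySem.Str.strip (lines.getD j "") == "" && decide (j+1 < lines.length)
            && PySem.Str.startswith (lines.getD (j+1) "") pvTAB) = true
        · rw [if_pos hbl, if_pos hbl]
          exact ih g' (j+1) _ (by omega) (by omega)
        · rw [if_neg hbl, if_neg hbl]
    · rw [pvAInner_stop_ge lines _ j block (by omega),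
        pvAInner_stop_ge lines g j block (by omega)]

-- one-step unfoldings of the inner loop at fuel = lines.length
theorem pvAInner_unfold_tab (lines : List String) (j : Nat) (block : List String)
    (h : j < lines.length)
    (ht : PySem.Str.startswith (lines.getD j "") pvTAB = true) :
    pvAInner lines lines.length j block
      = pvAInner lines lines.length (j+1)
          (block ++ [PySem.Str.slice (lines.getD j "") (some 4) none]) := by
  obtain ⟨m, hm⟩ : ∃ m, lines.length = m + 1 := ⟨lines.length - 1, by omega⟩
  conv_lhs => rw [hm]
  simp only [pvAInner]
  rw [if_pos h]
  try dsimp only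
  rw [if_pos ht]
  exact pvAInner_fuel lines m lines.length (j+1) _ (by omega) (by omega)

theorem pvAInner_unfold_blank (lines : List String) (j : Nat) (block : List String)
    (h : j < lines.length)
    (ht : ¬ PySem.Str.startswith (lines.getD j "") pvTAB = true)
    (hbl : (PySem.Str.strip (lines.getD j "") == "" && decide (j+1 < lines.length)
        && PySem.Str.startswith (lines.getD (j+1) "") pvTAB) = true) :
    pvAInner lines lines.length j block
      = pvAInner lines lines.length (j+1) (block ++ [""]) := by
  obtain ⟨m, hm⟩ : ∃ m, lines.length = m + 1 := ⟨lines.length - 1, by omega⟩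
  conv_lhs => rw [hm]
  simp only [pvAInner]
  rw [if_pos h]
  try dsimp only
  rw [if_neg ht, if_pos hbl]
  exact pvAInner_fuel lines m lines.length (j+1) _ (by omega) (by omega)

theorem pvAInner_unfold_stop (lines : List String) (j : Nat) (block : List String)
    (h : j < lines.length)
    (ht : ¬ PySem.Str.startswith (lines.getD j "") pvTAB = true)
    (hbl : ¬ (PySem.Str.strip (lines.getD j "") == "" && decide (j+1 < lines.length)
        && PySem.Str.startswith (lines.getD (j+1) "") pvTAB) = true) :
    pvAInner lines lines.length j block = (block, j) := by
  obtain ⟨m, hm⟩ : ∃ m, lines.length = m + 1 := ⟨lines.length - 1, by omega⟩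
  conv_lhs => rw [hm]
  simp only [pvAInner]
  rw [if_pos h]
  try dsimp only
  rw [if_neg ht, if_neg hbl]

theorem pvAInner_ge (lines : List String) :
    ∀ f j block, j ≤ (pvAInner lines f j block).2 := by
  intro f
  induction f with
  | zero => intro j block; exact Nat.le_refl j
  | succ f ih =>
    intro j block
    simp only [pvAInner]
    by_cases hj : j < lines.length
    · rw [if_pos hj]
      try dsimp only
      by_cases ht : PySem.Str.startswith (lines.getD j "") pvTAB = true
      · rw [if_pos ht]
        exact le_trans (Nat.le_succ j) (ih (j+1) _)
      · rw [if_neg ht]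
        by_cases hbl : (PySem.Str.strip (lines.getD j "") == "" && decide (j+1 < lines.length)
            && PySem.Str.startswith (lines.getD (j+1) "") pvTAB) = true
        · rw [if_pos hbl]
          exact le_trans (Nat.le_succ j) (ih (j+1) _)
        · rw [if_neg hbl]
    · rw [if_neg hj]

theorem pv_main (lines : List String) :
    ∀ n i, lines.length - i = n →
      (∀ (fence : Bool) (fuel : Nat), lines.length - i ≤ fuel →
         pvALoop lines fuel i fence
           = pvBLoop (lines.drop i) fence false []
               (decide (i = 0) || (PySem.Str.strip (lines.getD (i-1) "") == ""))) ∧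
      (∀ (fence : Bool) (acc : List String) (pb : Bool) (fuel : Nat),
         lines.length - (pvAInner lines lines.length i acc).2 ≤ fuel →
         pvBLoop (lines.drop i) fence true acc pb
           = "```tex" :: (pvAInner lines lines.length i acc).1
               ++ "```" :: pvALoop lines fuel (pvAInner lines lines.length i acc).2 fence) := by
  intro n
  induction n with
  | zero =>
    intro i h
    have hge : lines.length ≤ i := by omega
    have hd : lines.drop i = [] := List.drop_eq_nil_of_le hge
    constructor
    · intro fence fuel _
      rw [pvALoop_nil lines fuel i fence hge, hd]
      simp [pvBLoop]
    · intro fence acc pb fuel _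
      rw [pvAInner_stop_ge lines lines.length i acc hge, hd,
        pvALoop_nil lines fuel i fence hge]
      simp [pvBLoop]
  | succ n ih =>
    intro i h
    have hi : i < lines.length := by omega
    have hd : lines.drop i = lines[i] :: lines.drop (i+1) := (List.getElem_cons_drop hi).symm
    have hg : lines.getD i "" = lines[i] := List.getD_eq_getElem lines "" hi
    have hpb : ∀ s : String,
        (decide (i+1 = 0) || (PySem.Str.strip (lines.getD (i+1-1) "") == s))
          = (PySem.Str.strip lines[i] == s) := by
      intro s; simp [List.getElem?_eq_getElem hi]
    constructor
    · -- part 1: not in block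
      intro fence fuel hfuel
      obtain ⟨f, rfl⟩ : ∃ f, fuel = f + 1 := ⟨fuel - 1, by omega⟩
      simp only [pvALoop]
      rw [if_pos hi]
      try dsimp only
      rw [hg]
      by_cases hf : PySem.Str.startswith lines[i] "```" = true
      · rw [if_pos hf, hd]
        simp only [pvBLoop, Bool.false_and, Bool.false_eq_true, if_false, if_pos hf,
          List.nil_append]
        rw [(ih (i+1) (by omega)).1 (!fence) f (by omega), hpb]
      · rw [if_neg hf]
        by_cases hb : (PySem.Str.startswith lines[i] pvTAB
            && (decide (i = 0) || (PySem.Str.strip (lines.getD (i-1) "") == "")) && !fence) = true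
        · rw [if_pos hb]
          have ht : PySem.Str.startswith (lines.getD i "") pvTAB = true := by
            rw [hg]; simp only [Bool.and_eq_true] at hb; exact hb.1.1
          try dsimp only
          rw [pvAInner_unfold_tab lines i [] hi ht, hg]
          rw [hd]
          simp only [pvBLoop, Bool.false_and, Bool.false_eq_true, if_false, if_neg hf, if_pos hb,
            List.nil_append]
          have hge2 := pvAInner_ge lines lines.length (i+1)
            [PySem.Str.slice lines[i] (some 4) none]
          rw [(ih (i+1) (by omega)).2 fence
            [PySem.Str.slice lines[i] (some 4) none] (PySem.Str.strip lines[i] == "") f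
            (by omega)]
          simp
        · rw [if_neg hb, hd]
          simp only [pvBLoop, Bool.false_and, Bool.false_eq_true, if_false, if_neg hf, if_neg hb,
            List.nil_append]
          rw [(ih (i+1) (by omega)).1 fence f (by omega), hpb]
    · -- part 2: in block with accumulator acc
      intro fence acc pb fuel hfuel
      rw [hd]
      simp only [pvBLoop, Bool.true_and]
      by_cases ht : PySem.Str.startswith lines[i] pvTAB = true
      · rw [if_pos ht]
        rw [pvAInner_unfold_tab lines i acc hi (by rw [hg]; exact ht), hg] at hfuel ⊢
        exact (ih (i+1) (by omega)).2 fence _ _ fuel hfuel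
      · rw [if_neg ht]
        have hmatch : (match lines.drop (i+1) with
              | nxt :: _ => PySem.Str.startswith nxt pvTAB | [] => false)
            = (decide (i+1 < lines.length) && PySem.Str.startswith (lines.getD (i+1) "") pvTAB) := by
          by_cases h2 : i+1 < lines.length
          · rw [(List.getElem_cons_drop h2).symm]
            simp [h2]
          · rw [List.drop_eq_nil_of_le (by omega)]
            simp [h2]
        have hgt : ¬ PySem.Str.startswith (lines.getD i "") pvTAB = true := by
          rw [hg]; exact ht
        by_cases hbl : (PySem.Str.strip (lines.getD i "") == "" && decide (i+1 < lines.length)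
            && PySem.Str.startswith (lines.getD (i+1) "") pvTAB) = true
        · have hbl2 : (PySem.Str.strip lines[i] == "" && (match lines.drop (i+1) with
              | nxt :: _ => PySem.Str.startswith nxt pvTAB | [] => false)) = true := by
            rw [hmatch]; rw [hg] at hbl
            simp only [Bool.and_eq_true] at hbl ⊢
            exact ⟨hbl.1.1, hbl.1.2, hbl.2⟩
          rw [if_pos hbl2]
          rw [pvAInner_unfold_blank lines i acc hi hgt hbl] at hfuel ⊢
          exact (ih (i+1) (by omega)).2 fence _ _ fuel hfuel
        · have hbl2 : ¬ (PySem.Str.strip lines[i] == "" && (match lines.drop (i+1) with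
              | nxt :: _ => PySem.Str.startswith nxt pvTAB | [] => false)) = true := by
            rw [hmatch]; intro hc; apply hbl; rw [hg]
            simp only [Bool.and_eq_true] at hc ⊢
            exact ⟨⟨hc.1, hc.2.1⟩, hc.2.2⟩
          rw [if_neg hbl2]
          -- A side: the inner loop terminates here, returning (acc, i)
          rw [pvAInner_unfold_stop lines i acc hi hgt hbl] at hfuel ⊢
          dsimp only at hfuel ⊢
          -- both sides now process lines[i] as a normal line
          obtain ⟨f, rfl⟩ : ∃ f, fuel = f + 1 := ⟨fuel - 1, by omega⟩
          simp only [pvALoop]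
          rw [if_pos hi]
          try dsimp only
          rw [hg]
          by_cases hf : PySem.Str.startswith lines[i] "```" = true
          · rw [if_pos hf, if_pos hf, (ih (i+1) (by omega)).1 (!fence) f (by omega), hpb]
            simp
          · rw [if_neg hf, if_neg hf,
              if_neg (by intro hc; simp only [Bool.and_eq_true] at hc; exact ht hc.1.1 :
                ¬ (PySem.Str.startswith lines[i] pvTAB
                && (decide (i = 0) || (PySem.Str.strip (lines.getD (i-1) "") == "")) && !fence) = true),
              if_neg (by intro hc; simp only [Bool.and_eq_true] at hc; exact ht hc.1.1 :
                ¬ (PySem.Str.startswith lines[i] pvTAB && pb && !fence) = true)]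
            rw [(ih (i+1) (by omega)).1 fence f (by omega), hpb]
            simp

theorem fence_indented_output_blocks_spec : Claim_equal_fence_indented_output_blocks := by
  intro content _
  unfold Spec_fence_indented_output_blocks fence_indented_output_blocks fence_indented_output_blocks_alt
  have h := (pv_main (PySem.Str.splitlines content) _ 0 rfl).1 false
    (PySem.Str.splitlines content).length (by omega)
  simp only [List.drop_zero] at h
  simp [h]
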